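-- pv_equiv track=rewrite | github.com/Santh0shKr1shna/advent-of-code | 2025/Day03/main.py | part_two
-- ===== SOURCE A (Python) =====
-- from functools import cache
--
-- def part_two(banks):
--     res = 0
--
--     for bank in banks:
--         maxi = 0
--         n = len(bank)
--
--         @cache
--         def get_max(i, d):
--             if d <= 0 or i < 0:
--                 return 0
--
--             return max(get_max(i-1, d), get_max(i-1, d-1) * 10 + bank[i])
--
--         maxi = get_max(n-1, 12)
--
--         res += maxi
--
--     return res
-- ===== SOURCE B (Python) =====
-- def part_two(banks):
--     total = 0
--     for bank in banks:
--         row = [0] * 13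
--         for x in bank:
--             row = [0] + [max(row[d], row[d - 1] * 10 + x) for d in range(1, 13)]
--         total += row[12]
--     return total
-- ===== Notes on version B (the rewrite author's own statement) =====
-- stated objective: faster
-- what changed: Replaced the per-bank memoized top-down recursion (@cache get_max over indices) with an explicit bottom-up rolling-row DP of 13 entries updated once per element, removing Python call and cache-lookup overhead.
import Mathlib
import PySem

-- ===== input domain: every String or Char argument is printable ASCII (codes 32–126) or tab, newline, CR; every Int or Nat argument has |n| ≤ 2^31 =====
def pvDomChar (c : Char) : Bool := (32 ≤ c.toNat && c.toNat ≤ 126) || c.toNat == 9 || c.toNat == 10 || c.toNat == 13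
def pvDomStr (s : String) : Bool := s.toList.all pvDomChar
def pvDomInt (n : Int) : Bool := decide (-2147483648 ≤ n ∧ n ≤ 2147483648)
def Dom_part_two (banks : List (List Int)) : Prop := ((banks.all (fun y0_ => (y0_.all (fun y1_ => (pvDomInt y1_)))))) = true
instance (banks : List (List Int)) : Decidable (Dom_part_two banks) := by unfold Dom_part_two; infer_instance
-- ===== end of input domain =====

-- B replaces A's memoized top-down recursion with an explicit bottom-up rolling-row DP; same value, similar cost.

-- ===== PORT A =====
-- get_max(i, d) of A, with i shifted by one: getMaxA bank (i+1) d = Python get_max(i, d),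
-- getMaxA bank 0 d = get_max(-1, d) = 0. bank[i] is always in range here, so getD is exact.
def getMaxA (bank : List Int) : Nat → Nat → Int
  | 0, _ => 0
  | _ + 1, 0 => 0
  | i + 1, d + 1 => max (getMaxA bank i (d + 1)) (getMaxA bank i d * 10 + bank.getD i 0)

def part_two (banks : List (List Int)) : Int :=
  banks.foldl (fun res bank => res + getMaxA bank bank.length 12) 0

-- ===== PORT B =====
-- one DP step: row = [0] + [max(row[d], row[d-1]*10 + x) for d in range(1, 13)]
def stepB (row : List Int) (x : Int) : List Int :=
  0 :: (List.range' 1 12).map (fun d => max (row.getD d 0) (row.getD (d - 1) 0 * 10 + x))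

def bankMaxB (bank : List Int) : Int :=
  (bank.foldl stepB (List.replicate 13 0)).getD 12 0

def part_two_alt (banks : List (List Int)) : Int :=
  banks.foldl (fun total bank => total + bankMaxB bank) 0

-- ===== PRECONDITION & SPEC =====
def Spec_part_two (banks : List (List Int)) (out : Int) : Prop := out = part_two_alt banks
instance (banks : List (List Int)) (out : Int) : Decidable (Spec_part_two banks out) := by unfold Spec_part_two; infer_instance

-- ===== CLAIM (what is proved, stated in full; the proofs are below) =====
def Claim_equal_part_two : Prop := ∀ (banks : List (List Int)), Dom_part_two banks → Spec_part_two banks (part_two banks)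

-- ===== LEMMAS AND PROOFS =====

lemma stepB_spec (bank : List Int) (i : Nat) :
    stepB ((List.range 13).map (getMaxA bank i)) (bank.getD i 0)
      = (List.range 13).map (getMaxA bank (i + 1)) := by
  apply List.ext_getElem
  · simp [stepB]
  · intro d h1 h2
    simp only [stepB, List.length_cons, List.length_map, List.length_range'] at h1
    rcases d with _ | d
    · simp [stepB, getMaxA]
    · have hd : d < 12 := by omega
      have h1 : 1 + d < 13 := by omega
      have h2 : d < 13 := by omega
      simp [stepB, List.getElem_map, List.getElem_range', List.getD, h1, h2, getMaxA]
      rw [Nat.add_comm 1 d]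

lemma fold_stepB (bank : List Int) :
    ∀ (suffix : List Int) (i : Nat), bank.drop i = suffix →
      suffix.foldl stepB ((List.range 13).map (getMaxA bank i))
        = (List.range 13).map (getMaxA bank (i + suffix.length)) := by
  intro suffix
  induction suffix with
  | nil => intro i _; simp
  | cons x xs ih =>
    intro i hdrop
    have hlen := congrArg List.length hdrop
    simp at hlen
    have hi : i < bank.length := by omega
    have hx : bank.getD i 0 = x := by
      have h0 : (bank.drop i)[0]'(by rw [hdrop]; simp) = x := by simp [hdrop]
      rw [List.getElem_drop] at h0
      simp only [Nat.add_zero] at h0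
      simp [List.getD, List.getElem?_eq_getElem hi, h0]
    have hdrop' : bank.drop (i + 1) = xs := by
      rw [← List.drop_drop, hdrop]
      simp
    simp only [List.foldl_cons, List.length_cons]
    have hstep := stepB_spec bank i
    rw [hx] at hstep
    rw [hstep, ih (i + 1) hdrop', show i + 1 + xs.length = i + (xs.length + 1) by omega]

lemma bankMaxB_eq (bank : List Int) : bankMaxB bank = getMaxA bank bank.length 12 := by
  have hrepl : (List.replicate 13 (0 : Int)) = (List.range 13).map (getMaxA bank 0) := by
    apply List.ext_getElem
    · simp
    · intro d h1 h2
      simp [getMaxA]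
  have := fold_stepB bank bank 0 (by simp)
  unfold bankMaxB
  rw [hrepl, this]
  simp [List.getD]

-- ===== VERDICT (by name: the statement is the Claim_ definition above) =====
theorem part_two_spec : Claim_equal_part_two := by
  intro banks hdom
  clear hdom
  unfold Spec_part_two part_two part_two_alt
  induction banks using List.reverseRecOn with
  | nil => rfl
  | append_singleton xs x ih =>
    rw [List.foldl_append, List.foldl_append, ih]
    simp [bankMaxB_eq]
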